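-- pv_equiv track=rewrite | github.com/danagle/advent-of-code | 2015/19/solution.py | part_one
-- ===== SOURCE A (Python) =====
-- def part_one(replacement_rules, molecule):
--     distinct_molecules = set()
--     for rule, replacements in replacement_rules.items():
--         last_index = 0
--         while True:
--             index = molecule.find(rule, last_index)
--             if index == -1:
--                 break
--             for replacement in replacements:
--                 distinct_molecules.add(molecule[:index] + replacement + molecule[index+len(rule):])
--             last_index = index + len(rule)
--     return len(distinct_molecules)
-- ===== SOURCE B (Python) =====
-- def part_one(replacement_rules, molecule):
--     seen = set()
--     for rule, replacements in replacement_rules.items():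
--         parts = molecule.split(rule)
--         for k in range(1, len(parts)):
--             for replacement in replacements:
--                 seen.add(rule.join(parts[:k]) + replacement + rule.join(parts[k:]))
--     return len(seen)
-- ===== Notes on version B (the rewrite author's own statement) =====
-- stated objective: idiomatic
-- what changed: Replaced A's per-rule while-loop of repeated str.find scans and slice surgery by str.split(rule) followed by rule.join reconstruction: each of the len(parts)-1 separators is rebuilt with the replacement spliced in; Pre_ excludes empty rule strings, on which A's find-loop never terminates and B's split('') raises ValueError.
import Mathlib
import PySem

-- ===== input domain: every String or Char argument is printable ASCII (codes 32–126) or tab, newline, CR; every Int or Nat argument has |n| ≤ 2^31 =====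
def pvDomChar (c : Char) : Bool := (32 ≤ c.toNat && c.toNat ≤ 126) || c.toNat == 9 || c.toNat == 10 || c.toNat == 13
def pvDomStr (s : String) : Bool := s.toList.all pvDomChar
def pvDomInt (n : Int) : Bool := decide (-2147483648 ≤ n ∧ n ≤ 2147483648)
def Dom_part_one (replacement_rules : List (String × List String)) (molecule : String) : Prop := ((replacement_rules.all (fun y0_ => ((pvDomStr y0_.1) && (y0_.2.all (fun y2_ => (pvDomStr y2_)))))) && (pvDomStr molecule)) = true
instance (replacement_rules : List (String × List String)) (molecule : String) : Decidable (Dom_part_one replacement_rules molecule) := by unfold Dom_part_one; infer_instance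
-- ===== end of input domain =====

-- B replaces A's per-rule repeated str.find scanning by split/join: molecule.split(rule)
-- decomposes the string once, and each of the len(parts)-1 separators is rebuilt with the
-- replacement spliced in (objective: alternative decomposition, not claimed faster).

-- ===== PORT A =====
-- while True: index = molecule.find(rule, last_index); … ; last_index = index + len(rule)
-- fuel = len(molecule) + 2 bounds the iteration count: under Pre_ every rule is nonempty, so
-- last_index strictly increases and the loop runs at most len(molecule) + 1 times.
def pvFindLoopA (m rule : List Char) (reps : List (List Char)) : Nat → Nat → PySem.Set (List Char) → PySem.Set (List Char)
  | 0, _, acc => acc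
  | fuel+1, lastIndex, acc =>
    let index := PySem.Chars.findFrom m rule (lastIndex : Int) none
    if index = -1 then acc
    else
      pvFindLoopA m rule reps fuel (index.toNat + rule.length)
        (reps.foldl (fun a rep =>
          PySem.Set.add a (PySem.List.slice m none (some index) ++ rep ++ PySem.List.slice m (some (index + (rule.length : Int))) none)) acc)

def part_one (replacement_rules : List (String × List String)) (molecule : String) : Int :=
  let m := molecule.toList
  let s := replacement_rules.foldl
    (fun acc pr => pvFindLoopA m pr.1.toList (pr.2.map String.toList) (m.length + 2) 0 acc)
    PySem.Set.empty
  (PySem.Set.len s : Int)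

-- ===== PORT B =====
-- parts = molecule.split(rule); for k in range(1, len(parts)): seen.add(rule.join(parts[:k]) + replacement + rule.join(parts[k:]))
def part_one_alt (replacement_rules : List (String × List String)) (molecule : String) : Int :=
  let s := replacement_rules.foldl
    (fun seen pr =>
      let rule := pr.1.toList
      let parts := PySem.Chars.splitOn molecule.toList rule
      (PySem.List.pyRange 1 (parts.length : Int)).foldl
        (fun seen k =>
          (pr.2.map String.toList).foldl
            (fun a rep => PySem.Set.add a
              (PySem.Chars.join rule (PySem.List.slice parts none (some k)) ++ rep ++
               PySem.Chars.join rule (PySem.List.slice parts (some k) none))) seen)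
        seen)
    PySem.Set.empty
  (PySem.Set.len s : Int)

-- ===== PRECONDITION & SPEC =====
-- Pre_ excludes empty rule strings: on those A's find-loop never terminates (A returns no
-- value there), and B's molecule.split('') raises ValueError.
def Pre_part_one (replacement_rules : List (String × List String)) (molecule : String) : Prop :=
  ∀ pr ∈ replacement_rules, pr.1 ≠ ""
instance (replacement_rules : List (String × List String)) (molecule : String) : Decidable (Pre_part_one replacement_rules molecule) := by unfold Pre_part_one; infer_instance
def pvWitness_part_one : (List (String × List String)) × String := ([("H", ["HO", "OH"]), ("O", ["HH"])], "HOH")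

def Spec_part_one (replacement_rules : List (String × List String)) (molecule : String) (out : Int) : Prop := out = part_one_alt replacement_rules molecule
instance (replacement_rules : List (String × List String)) (molecule : String) (out : Int) : Decidable (Spec_part_one replacement_rules molecule out) := by unfold Spec_part_one; infer_instance

-- ===== CLAIM (what is proved, stated in full; the proofs are below) =====
def Claim_equal_part_one : Prop := ∀ (replacement_rules : List (String × List String)) (molecule : String), Dom_part_one replacement_rules molecule → Pre_part_one replacement_rules molecule → Spec_part_one replacement_rules molecule (part_one replacement_rules molecule)

-- ===== LEMMAS AND PROOFS =====

-- proof-side vocabulary ----------------------------------------------------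
def pvBuild (m r rep : List Char) (i : Nat) : List Char :=
  m.take i ++ rep ++ m.drop (i + r.length)

-- occurrence positions produced by A's repeated-find loop, fuelled
def pvOcc (m r : List Char) : Nat → Nat → List Nat
  | 0, _ => []
  | fuel+1, p =>
    let i := PySem.Chars.findFrom m r (p : Int) none
    if i = -1 then [] else i.toNat :: pvOcc m r fuel (i.toNat + r.length)

-- greedy scan over positions with a gate (bridge between find-loop and split)
def pvScan (m r : List Char) (g j : Nat) : List Nat :=
  if _h : j < m.length then
    if g ≤ j ∧ (m.drop j).take r.length = r then j :: pvScan m r (j + r.length) (j+1)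
    else pvScan m r g (j+1)
  else []
termination_by m.length - j
decreasing_by all_goals omega

-- the greedy non-overlapping decomposition str.split computes
def pvPieces (r l : List Char) : List (List Char) :=
  if h : r ≠ [] ∧ r <+: l then [] :: pvPieces r (l.drop r.length)
  else
    match l with
    | [] => [[]]
    | c :: rest =>
      match pvPieces r rest with
      | [] => [[c]]
      | q :: qs => (c :: q) :: qs
termination_by l.length
decreasing_by
  · have h1 := h.2.length_le
    have h2 : 0 < r.length := List.length_pos_of_ne_nil h.1
    simp only [List.length_drop]; omega
  · simp only [List.length_cons]; omega

theorem pv_slice_build (m rep : List Char) (i L : Nat) :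
    PySem.List.slice m none (some (i : Int)) ++ rep ++ PySem.List.slice m (some ((i : Int) + (L : Int))) none
      = m.take i ++ rep ++ m.drop (i + L) := by
  rw [PySem.List.slice_to m (by positivity), PySem.List.slice_from m (by positivity),
    ← Nat.cast_add, Int.toNat_natCast, Int.toNat_natCast]

theorem pv_nodup_foldl_add {β : Type} (l : List β) (f : β → List Char) (s : PySem.Set (List Char))
    (hs : s.Nodup) : (l.foldl (fun a b => PySem.Set.add a (f b)) s).Nodup := by
  induction l generalizing s with
  | nil => exact hs
  | cons b l ih => exact ih _ (PySem.Set.nodup_add _ _ hs)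

theorem pv_match_iff (m r : List Char) (i : Nat) :
    (m.drop i).take r.length = r ↔ r <+: m.drop i := by
  rw [List.prefix_iff_eq_take]
  exact eq_comm

theorem pv_match_bound (m r : List Char) (i : Nat) (h : (m.drop i).take r.length = r) :
    i + r.length ≤ m.length ∨ r = [] := by
  by_cases hr : r = []
  · exact Or.inr hr
  · left
    have hpre : r <+: m.drop i := (pv_match_iff m r i).mp h
    have hle := hpre.length_le
    have hpos : 0 < r.length := List.length_pos_of_ne_nil hr
    simp only [List.length_drop] at hle
    omega

-- A side ------------------------------------------------------------------
theorem pv_mem_findLoopA (m r : List Char) (reps : List (List Char)) :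
    ∀ (fuel p : Nat), p ≤ m.length → ∀ (acc : PySem.Set (List Char)) (x : List Char),
    x ∈ pvFindLoopA m r reps fuel p acc ↔
      x ∈ acc ∨ ∃ i ∈ pvOcc m r fuel p, ∃ rep ∈ reps, x = pvBuild m r rep i := by
  intro fuel
  induction fuel with
  | zero => intro p hp acc x; simp [pvFindLoopA, pvOcc]
  | succ fuel ih =>
    intro p hp acc x
    by_cases hneg : PySem.Chars.findFrom m r (p : Int) none = -1
    · simp [pvFindLoopA, pvOcc, hneg]
    · obtain ⟨hge, hpre, hmin⟩ := PySem.Chars.findFrom_natCast_spec m r p hp hneg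
      have hf0 : (0 : Int) ≤ PySem.Chars.findFrom m r (p : Int) none := by omega
      have hfle : PySem.Chars.findFrom m r (p : Int) none ≤ (m.length : Int) := by
        rw [PySem.Chars.findFrom_natCast m r p hp]
        split_ifs with h
        · omega
        · have h2 := PySem.Chars.find_le_length (m.drop p) r
          rw [List.length_drop] at h2
          omega
      have hbound : (PySem.Chars.findFrom m r (p : Int) none).toNat + r.length ≤ m.length := by
        have := hpre.length_le
        simp only [List.length_drop] at this
        omega
      have hstep : pvFindLoopA m r reps (fuel+1) p acc
          = pvFindLoopA m r reps fuel ((PySem.Chars.findFrom m r (p : Int) none).toNat + r.length)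
            (reps.foldl (fun a rep => PySem.Set.add a
              (PySem.List.slice m none (some (PySem.Chars.findFrom m r (p : Int) none)) ++ rep ++
               PySem.List.slice m (some (PySem.Chars.findFrom m r (p : Int) none + (r.length : Int))) none)) acc) := by
        simp only [pvFindLoopA]
        rw [if_neg hneg]
      have hocc : pvOcc m r (fuel+1) p
          = (PySem.Chars.findFrom m r (p : Int) none).toNat :: pvOcc m r fuel ((PySem.Chars.findFrom m r (p : Int) none).toNat + r.length) := by
        simp only [pvOcc]
        rw [if_neg hneg]
      have hb : ∀ rep : List Char,
          PySem.List.slice m none (some (PySem.Chars.findFrom m r (p : Int) none)) ++ rep ++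
            PySem.List.slice m (some (PySem.Chars.findFrom m r (p : Int) none + (r.length : Int))) none
          = pvBuild m r rep (PySem.Chars.findFrom m r (p : Int) none).toNat := by
        intro rep
        have hfe : PySem.Chars.findFrom m r (p : Int) none
            = (((PySem.Chars.findFrom m r (p : Int) none).toNat : Nat) : Int) := by omega
        rw [hfe]
        exact pv_slice_build m rep _ _
      rw [hstep, ih _ hbound, PySem.Set.mem_foldl_add, hocc]
      simp only [hb, List.mem_cons]
      constructor
      · rintro ((h | ⟨rep, hrep, rfl⟩) | ⟨i, hi, rep, hrep, rfl⟩)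
        · exact Or.inl h
        · exact Or.inr ⟨_, Or.inl rfl, rep, hrep, rfl⟩
        · exact Or.inr ⟨i, Or.inr hi, rep, hrep, rfl⟩
      · rintro (h | ⟨i, (rfl | hi), rep, hrep, rfl⟩)
        · exact Or.inl (Or.inl h)
        · exact Or.inl (Or.inr ⟨rep, hrep, rfl⟩)
        · exact Or.inr ⟨i, hi, rep, hrep, rfl⟩

theorem pv_findLoopA_nodup (m r : List Char) (reps : List (List Char)) :
    ∀ (fuel p : Nat) (acc : PySem.Set (List Char)), acc.Nodup →
    (pvFindLoopA m r reps fuel p acc).Nodup := by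
  intro fuel
  induction fuel with
  | zero => intro p acc h; simpa [pvFindLoopA] using h
  | succ fuel ih =>
    intro p acc h
    simp only [pvFindLoopA]
    split_ifs with hneg
    · exact h
    · exact ih _ _ (pv_nodup_foldl_add _ _ _ h)

theorem pv_memA (m : List Char) :
    ∀ (rules : List (String × List String)) (acc : PySem.Set (List Char)) (x : List Char),
    x ∈ rules.foldl (fun acc pr => pvFindLoopA m pr.1.toList (pr.2.map String.toList) (m.length + 2) 0 acc) acc ↔
      x ∈ acc ∨ ∃ pr ∈ rules, ∃ i ∈ pvOcc m pr.1.toList (m.length + 2) 0, ∃ rep ∈ pr.2,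
        x = pvBuild m pr.1.toList rep.toList i := by
  intro rules
  induction rules with
  | nil => intro acc x; simp
  | cons pr rules ih =>
    intro acc x
    simp only [List.foldl_cons]
    rw [ih, pv_mem_findLoopA m pr.1.toList (pr.2.map String.toList) (m.length + 2) 0 (Nat.zero_le _)]
    constructor
    · rintro ((h | ⟨i, hi, rep, hrep, rfl⟩) | ⟨pr', hpr', i, hi, rep, hrep, rfl⟩)
      · exact Or.inl h
      · obtain ⟨rep0, hrep0, rfl⟩ := List.mem_map.mp hrep
        exact Or.inr ⟨pr, by simp, i, hi, rep0, hrep0, rfl⟩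
      · exact Or.inr ⟨pr', List.mem_cons_of_mem _ hpr', i, hi, rep, hrep, rfl⟩
    · rintro (h | ⟨pr', hpr', i, hi, rep, hrep, rfl⟩)
      · exact Or.inl (Or.inl h)
      · rcases List.mem_cons.mp hpr' with rfl | hpr'
        · exact Or.inl (Or.inr ⟨i, hi, rep.toList, List.mem_map.mpr ⟨rep, hrep, rfl⟩, rfl⟩)
        · exact Or.inr ⟨pr', hpr', i, hi, rep, hrep, rfl⟩

theorem pv_nodupA (m : List Char) :
    ∀ (rules : List (String × List String)) (acc : PySem.Set (List Char)), acc.Nodup →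
    (rules.foldl (fun acc pr => pvFindLoopA m pr.1.toList (pr.2.map String.toList) (m.length + 2) 0 acc) acc).Nodup := by
  intro rules
  induction rules with
  | nil => intro acc h; simpa using h
  | cons pr rules ih =>
    intro acc h
    exact ih _ (pv_findLoopA_nodup m _ _ _ _ _ h)

-- find-loop ↔ gated scan --------------------------------------------------
theorem pv_drop_drop (m : List Char) (t a : Nat) : (m.drop t).drop a = m.drop (t + a) := by
  rw [List.drop_drop, Nat.add_comm]

theorem pv_findFrom_succ (m r : List Char) (hr : r ≠ []) (j : Nat) (hj : j < m.length)
    (hno : ¬ r <+: m.drop j) :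
    PySem.Chars.findFrom m r (j : Int) none = PySem.Chars.findFrom m r ((j+1 : Nat) : Int) none := by
  have hj1 : j + 1 ≤ m.length := hj
  have hdd : ∀ a : Nat, (m.drop j).drop a = m.drop (j + a) := fun a => pv_drop_drop m j a
  have hdd1 : ∀ a : Nat, (m.drop (j+1)).drop a = m.drop (j + 1 + a) := fun a => pv_drop_drop m (j+1) a
  rw [PySem.Chars.findFrom_natCast m r j (le_of_lt hj), PySem.Chars.findFrom_natCast m r (j+1) hj1]
  by_cases hc : r <:+: m.drop (j+1)
  · have hsuf : m.drop (j+1) <:+ m.drop j := by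
      have h1 : (m.drop j).drop 1 = m.drop (j+1) := hdd 1
      rw [← h1]
      exact List.drop_suffix 1 _
    have hcj : r <:+: m.drop j := hc.trans hsuf.isInfix
    have hne1 : PySem.Chars.find (m.drop j) r ≠ -1 := by
      rw [Ne, PySem.Chars.find_eq_neg_one_iff]; exact fun h => h hcj
    have hne2 : PySem.Chars.find (m.drop (j+1)) r ≠ -1 := by
      rw [Ne, PySem.Chars.find_eq_neg_one_iff]; exact fun h => h hc
    have hn1 : 0 ≤ PySem.Chars.find (m.drop j) r := (PySem.Chars.find_nonneg_iff _ _).mpr hcj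
    have hn2 : 0 ≤ PySem.Chars.find (m.drop (j+1)) r := (PySem.Chars.find_nonneg_iff _ _).mpr hc
    obtain ⟨hp1, hm1⟩ := PySem.Chars.find_spec hn1
    obtain ⟨hp2, hm2⟩ := PySem.Chars.find_spec hn2
    rw [if_neg hne1, if_neg hne2]
    set f1 := (PySem.Chars.find (m.drop j) r).toNat with hf1
    set f2 := (PySem.Chars.find (m.drop (j+1)) r).toNat with hf2
    have hf1pos : f1 ≠ 0 := by
      intro h0
      rw [h0] at hp1
      simp only [List.drop_zero] at hp1
      exact hno hp1
    have hgef : f2 ≤ f1 - 1 := by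
      by_contra hlt
      push_neg at hlt
      have hpp : r <+: (m.drop (j+1)).drop (f1 - 1) := by
        rw [hdd1 (f1-1)]
        have hx := hp1
        rw [hdd f1] at hx
        have he : j + 1 + (f1 - 1) = j + f1 := by omega
        rw [he]
        exact hx
      exact hm2 _ hlt hpp
    have hlef : f1 - 1 ≤ f2 := by
      by_contra hlt
      push_neg at hlt
      have hpp : r <+: (m.drop j).drop (f2 + 1) := by
        rw [hdd (f2+1)]
        have hx := hp2
        rw [hdd1 f2] at hx
        have he : j + (f2 + 1) = j + 1 + f2 := by omega
        rw [he]
        exact hx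
      exact hm1 _ (by omega) hpp
    omega
  · have h2 : PySem.Chars.find (m.drop (j+1)) r = -1 := (PySem.Chars.find_eq_neg_one_iff _ _).mpr hc
    have h1 : PySem.Chars.find (m.drop j) r = -1 := by
      rw [PySem.Chars.find_eq_neg_one_iff]
      intro hinf
      obtain ⟨a, ha⟩ := (PySem.Chars.exists_prefix_drop_iff_isIn r (m.drop j)).mpr
        ((PySem.Chars.isIn_iff_infix r (m.drop j)).mpr hinf)
      cases a with
      | zero =>
        simp only [List.drop_zero] at ha
        exact hno ha
      | succ a =>
        apply hc
        have hpp : r <+: (m.drop (j+1)).drop a := by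
          rw [hdd1 a]
          rw [hdd (a+1)] at ha
          have he : j + 1 + a = j + (a + 1) := by omega
          rw [he]
          exact ha
        exact hpp.isInfix.trans (List.drop_suffix a _).isInfix
    rw [if_pos h1, if_pos h2]

theorem pv_occ_len (m r : List Char) (hr : r ≠ []) (fuel : Nat) : pvOcc m r fuel m.length = [] := by
  cases fuel with
  | zero => rfl
  | succ f =>
    have hne : PySem.Chars.findFrom m r (m.length : Int) none = -1 := by
      rw [PySem.Chars.findFrom_natCast_eq_neg_one_iff m r m.length le_rfl]
      rw [List.drop_length]
      intro h
      exact hr (List.eq_nil_of_infix_nil h)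
    simp [pvOcc, hne]

theorem pv_findFrom_here (m r : List Char) (j : Nat) (hj : j ≤ m.length)
    (hyes : r <+: m.drop j) :
    PySem.Chars.findFrom m r (j : Int) none = (j : Int) := by
  have hne : PySem.Chars.findFrom m r (j : Int) none ≠ -1 := by
    intro h
    exact ((PySem.Chars.findFrom_natCast_eq_neg_one_iff m r j hj).mp h) hyes.isInfix
  obtain ⟨hge, hpre, hmin⟩ := PySem.Chars.findFrom_natCast_spec m r j hj hne
  have h1 : ¬ j < (PySem.Chars.findFrom m r (j : Int) none).toNat := fun hlt => hmin j le_rfl hlt hyes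
  omega

theorem pv_scan_eq_occ (m r : List Char) (hr : r ≠ []) :
    ∀ (d j g fuel : Nat), m.length - j ≤ d → j ≤ m.length → g ≤ m.length →
      m.length - max g j < fuel →
    pvScan m r g j = pvOcc m r fuel (max g j) := by
  have hrpos : 0 < r.length := List.length_pos_of_ne_nil hr
  intro d
  induction d with
  | zero =>
    intro j g fuel hd hj hg hfuel
    rw [pvScan, dif_neg (by omega : ¬ j < m.length)]
    have hmax : max g j = m.length := by omega
    rw [hmax, pv_occ_len m r hr fuel]
  | succ d ih =>
    intro j g fuel hd hj hg hfuel
    by_cases hjl : j < m.length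
    · rw [pvScan, dif_pos hjl]
      by_cases hcond : g ≤ j ∧ (m.drop j).take r.length = r
      · rw [if_pos hcond]
        have hmax : max g j = j := by omega
        rw [hmax] at hfuel ⊢
        have hpre : r <+: m.drop j := (pv_match_iff m r j).mp hcond.2
        have hff : PySem.Chars.findFrom m r (j : Int) none = (j : Int) :=
          pv_findFrom_here m r j (le_of_lt hjl) hpre
        have hrlen : j + r.length ≤ m.length := by
          rcases pv_match_bound m r j hcond.2 with h | h
          · exact h
          · exact absurd h hr
        cases fuel with
        | zero => exact absurd hfuel (by omega)
        | succ f =>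
          simp only [pvOcc]
          rw [hff, if_neg (by omega : ¬ (j : Int) = -1), Int.toNat_natCast]
          congr 1
          have hih := ih (j+1) (j + r.length) f (by omega) (by omega) hrlen
            (by rw [Nat.max_eq_left (by omega)]; omega)
          rw [hih, Nat.max_eq_left (by omega)]
      · rw [if_neg hcond]
        by_cases hgj : g ≤ j
        · have hnm : ¬ (m.drop j).take r.length = r := fun h => hcond ⟨hgj, h⟩
          have hno : ¬ r <+: m.drop j := fun h => hnm ((pv_match_iff m r j).mpr h)
          have heq := pv_findFrom_succ m r hr j hjl hno
          have hmax : max g j = j := by omega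
          have hmax1 : max g (j+1) = j + 1 := by omega
          rw [hmax] at hfuel ⊢
          have hih := ih (j+1) g fuel (by omega) (by omega) hg (by rw [hmax1]; omega)
          rw [hih, hmax1]
          cases fuel with
          | zero => rfl
          | succ f =>
            simp only [pvOcc]
            rw [heq]
        · have hmax : max g j = g := by omega
          have hmax1 : max g (j+1) = g := by omega
          rw [hmax] at hfuel ⊢
          have hih := ih (j+1) g fuel (by omega) (by omega) hg (by rw [hmax1]; omega)
          rw [hih, hmax1]
    · rw [pvScan, dif_neg hjl]
      have hmax : max g j = m.length := by omega
      rw [hmax, pv_occ_len m r hr fuel]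

-- scan gate normalisation --------------------------------------------------
theorem pv_scan_skip (m r : List Char) :
    ∀ (d j g : Nat), g - j ≤ d → j ≤ g → pvScan m r g j = pvScan m r g g := by
  intro d
  induction d with
  | zero =>
    intro j g hd hj
    have : j = g := by omega
    rw [this]
  | succ d ih =>
    intro j g hd hj
    by_cases hjg : j = g
    · rw [hjg]
    · have hlt : j < g := by omega
      by_cases hjl : j < m.length
      · conv_lhs => rw [pvScan]
        rw [dif_pos hjl, if_neg (fun h => by omega : ¬ (g ≤ j ∧ (m.drop j).take r.length = r))]
        exact ih (j+1) g (by omega) (by omega)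
      · conv_lhs => rw [pvScan]
        conv_rhs => rw [pvScan]
        rw [dif_neg hjl, dif_neg (by omega : ¬ g < m.length)]

theorem pv_scan_gate (m r : List Char) :
    ∀ (d j g g' : Nat), m.length - j ≤ d → g ≤ j → g' ≤ j →
    pvScan m r g j = pvScan m r g' j := by
  intro d
  induction d with
  | zero =>
    intro j g g' hd hg hg'
    rw [pvScan, dif_neg (by omega : ¬ j < m.length), pvScan, dif_neg (by omega : ¬ j < m.length)]
  | succ d ih =>
    intro j g g' hd hg hg'
    by_cases hjl : j < m.length
    · by_cases hm : (m.drop j).take r.length = r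
      · conv_lhs => rw [pvScan]
        conv_rhs => rw [pvScan]
        rw [dif_pos hjl, if_pos ⟨hg, hm⟩, dif_pos hjl, if_pos ⟨hg', hm⟩]
      · conv_lhs => rw [pvScan]
        conv_rhs => rw [pvScan]
        rw [dif_pos hjl, if_neg (fun h => hm h.2), dif_pos hjl, if_neg (fun h => hm h.2)]
        exact ih (j+1) g g' (by omega) (by omega) (by omega)
    · conv_lhs => rw [pvScan]
      conv_rhs => rw [pvScan]
      rw [dif_neg hjl, dif_neg hjl]

-- pvPieces equations and facts ---------------------------------------------
theorem pvPieces_pos (r l : List Char) (h : r ≠ [] ∧ r <+: l) :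
    pvPieces r l = [] :: pvPieces r (l.drop r.length) := by
  rw [pvPieces]
  rw [dif_pos h]

theorem pvPieces_nil (r : List Char) (hr : r ≠ []) : pvPieces r [] = [[]] := by
  rw [pvPieces]
  rw [dif_neg (fun h => hr (List.prefix_nil.mp h.2))]

theorem pvPieces_ne_nil (r l : List Char) : pvPieces r l ≠ [] := by
  rw [pvPieces]
  split
  · simp
  · split
    · simp
    · split <;> simp

theorem pvPieces_cons_eq (r : List Char) (c : Char) (rest q : List Char) (qs : List (List Char))
    (h : ¬ (r ≠ [] ∧ r <+: (c :: rest))) (hq : pvPieces r rest = q :: qs) :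
    pvPieces r (c :: rest) = (c :: q) :: qs := by
  rw [pvPieces]
  rw [dif_neg h]
  simp only [hq]

theorem pv_join_cons_head (r c q : List Char) (qs : List (List Char)) :
    PySem.Chars.join r ((c ++ q) :: qs) = c ++ PySem.Chars.join r (q :: qs) := by
  cases qs with
  | nil => rw [PySem.Chars.join_singleton, PySem.Chars.join_singleton]
  | cons q2 qs' =>
    rw [PySem.Chars.join_cons_cons, PySem.Chars.join_cons_cons]
    simp [List.append_assoc]

theorem pv_join_pieces (r : List Char) (hr : r ≠ []) :
    ∀ (d : Nat) (l : List Char), l.length ≤ d → PySem.Chars.join r (pvPieces r l) = l := by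
  have hrpos : 0 < r.length := List.length_pos_of_ne_nil hr
  intro d
  induction d with
  | zero =>
    intro l hl
    have : l = [] := List.eq_nil_of_length_eq_zero (by omega)
    rw [this, pvPieces_nil r hr, PySem.Chars.join_singleton]
  | succ d ih =>
    intro l hl
    by_cases hp : r <+: l
    · rw [pvPieces_pos r l ⟨hr, hp⟩]
      have hlne : l ≠ [] := by
        intro h0; rw [h0] at hp; exact hr (List.prefix_nil.mp hp)
      have hih : PySem.Chars.join r (pvPieces r (l.drop r.length)) = l.drop r.length := by
        apply ih
        have : l.length ≥ 1 := by
          cases l with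
          | nil => exact absurd rfl hlne
          | cons a t => simp
        simp only [List.length_drop]
        omega
      obtain ⟨q2, qs2, hq⟩ : ∃ q2 qs2, pvPieces r (l.drop r.length) = q2 :: qs2 := by
        cases hqq : pvPieces r (l.drop r.length) with
        | nil => exact absurd hqq (pvPieces_ne_nil r _)
        | cons a t => exact ⟨a, t, rfl⟩
      rw [hq] at hih ⊢
      rw [PySem.Chars.join_cons_cons, List.nil_append, hih]
      conv_rhs => rw [← List.take_append_drop r.length l]
      congr 1
      exact List.prefix_iff_eq_take.mp hp
    · cases l with
      | nil => rw [pvPieces_nil r hr, PySem.Chars.join_singleton]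
      | cons c rest =>
        obtain ⟨q, qs, hq⟩ : ∃ q qs, pvPieces r rest = q :: qs := by
          cases hqq : pvPieces r rest with
          | nil => exact absurd hqq (pvPieces_ne_nil r _)
          | cons a t => exact ⟨a, t, rfl⟩
        rw [pvPieces_cons_eq r c rest q qs (fun h => hp h.2) hq]
        have hih : PySem.Chars.join r (q :: qs) = rest := by
          rw [← hq]
          apply ih
          simp at hl
          omega
        have : (c :: q) = [c] ++ q := rfl
        rw [this, pv_join_cons_head, hih]
        rfl

-- splitOn computes pvPieces ------------------------------------------------
theorem pv_go_eq (r : List Char) (hr : r ≠ []) :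
    ∀ (fuel : Nat) (l cur : List Char) (acc : List (List Char)) (q : List Char) (qs : List (List Char)),
      l.length < fuel → pvPieces r l = q :: qs →
      PySem.Chars.splitOn.go r fuel l cur acc = acc.reverse ++ (cur.reverse ++ q) :: qs := by
  have hrpos : 0 < r.length := List.length_pos_of_ne_nil hr
  intro fuel
  induction fuel with
  | zero => intro l cur acc q qs hl hq; omega
  | succ fuel ih =>
    intro l cur acc q qs hl hq
    cases l with
    | nil =>
      rw [pvPieces_nil r hr] at hq
      obtain ⟨rfl, rfl⟩ : q = [] ∧ qs = [] := by
        constructor <;> injection hq with h1 h2 <;> first | exact h1.symm | exact h2.symm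
      rw [PySem.Chars.splitOn.go.eq_def]
      simp
    | cons c rest =>
      rw [PySem.Chars.splitOn.go.eq_def]
      simp only []
      by_cases hp : r <+: (c :: rest)
      · rw [if_pos (List.isPrefixOf_iff_prefix.mpr hp)]
        rw [pvPieces_pos r (c :: rest) ⟨hr, hp⟩] at hq
        obtain ⟨rfl, hqs⟩ : q = [] ∧ qs = pvPieces r ((c :: rest).drop r.length) := by
          constructor <;> injection hq with h1 h2 <;> first | exact h1.symm | exact h2.symm
        obtain ⟨q2, qs2, hq2⟩ : ∃ q2 qs2, pvPieces r ((c :: rest).drop r.length) = q2 :: qs2 := by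
          cases hqq : pvPieces r ((c :: rest).drop r.length) with
          | nil => exact absurd hqq (pvPieces_ne_nil r _)
          | cons a t => exact ⟨a, t, rfl⟩
        have hlen : ((c :: rest).drop r.length).length < fuel := by
          simp only [List.length_drop, List.length_cons] at *
          omega
        rw [ih ((c :: rest).drop r.length) [] (cur.reverse :: acc) q2 qs2 hlen hq2]
        rw [hqs, hq2]
        simp
      · rw [if_neg (fun h => hp (List.isPrefixOf_iff_prefix.mp h))]
        obtain ⟨q0, qs0, hq0⟩ : ∃ q0 qs0, pvPieces r rest = q0 :: qs0 := by
          cases hqq : pvPieces r rest with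
          | nil => exact absurd hqq (pvPieces_ne_nil r _)
          | cons a t => exact ⟨a, t, rfl⟩
        rw [pvPieces_cons_eq r c rest q0 qs0 (fun h => hp h.2) hq0] at hq
        obtain ⟨hqe, rfl⟩ : q = c :: q0 ∧ qs = qs0 := by
          constructor <;> injection hq with h1 h2 <;> first | exact h1.symm | exact h2.symm
        have hlen : rest.length < fuel := by
          simp only [List.length_cons] at hl
          omega
        rw [ih rest (c :: cur) acc q0 qs hlen hq0]
        rw [hqe]
        simp

theorem pv_splitOn_eq (m r : List Char) (hr : r ≠ []) :
    PySem.Chars.splitOn m r = pvPieces r m := by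
  obtain ⟨q, qs, hq⟩ : ∃ q qs, pvPieces r m = q :: qs := by
    cases hqq : pvPieces r m with
    | nil => exact absurd hqq (pvPieces_ne_nil r _)
    | cons a t => exact ⟨a, t, rfl⟩
  unfold PySem.Chars.splitOn
  rw [pv_go_eq r hr (m.length + 1) m [] [] q qs (by omega) hq, hq]
  simp

-- the pieces/scan correspondence -------------------------------------------
theorem pv_corr (m r : List Char) (hr : r ≠ []) :
    ∀ (d j : Nat), m.length - j ≤ d → j ≤ m.length →
    (pvPieces r (m.drop j)).length = (pvScan m r j j).length + 1 ∧
    ∀ k, 1 ≤ k → k ≤ (pvScan m r j j).length →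
      m.take j ++ PySem.Chars.join r ((pvPieces r (m.drop j)).take k) = m.take ((pvScan m r j j).getD (k-1) 0) ∧
      PySem.Chars.join r ((pvPieces r (m.drop j)).drop k) = m.drop ((pvScan m r j j).getD (k-1) 0 + r.length) := by
  have hrpos : 0 < r.length := List.length_pos_of_ne_nil hr
  intro d
  induction d with
  | zero =>
    intro j hd hj
    have hje : j = m.length := by omega
    subst hje
    rw [List.drop_length, pvPieces_nil r hr, pvScan, dif_neg (lt_irrefl _)]
    exact ⟨rfl, fun k hk1 hk2 => absurd hk2 (by simp; omega)⟩
  | succ d ih =>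
    intro j hd hj
    by_cases hjl : j < m.length
    · by_cases hm : (m.drop j).take r.length = r
      · -- match at j
        have hp : r <+: m.drop j := (pv_match_iff m r j).mp hm
        have hjL : j + r.length ≤ m.length := by
          rcases pv_match_bound m r j hm with h | h
          · exact h
          · exact absurd h hr
        have hscan : pvScan m r j j = j :: pvScan m r (j + r.length) (j + r.length) := by
          conv_lhs => rw [pvScan]
          rw [dif_pos hjl, if_pos ⟨le_rfl, hm⟩,
            pv_scan_skip m r (j + r.length) (j+1) (j + r.length) (by omega) (by omega)]
        have hpieces : pvPieces r (m.drop j) = [] :: pvPieces r (m.drop (j + r.length)) := by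
          rw [pvPieces_pos r (m.drop j) ⟨hr, hp⟩, pv_drop_drop]
        obtain ⟨ihl, ihk⟩ := ih (j + r.length) (by omega) hjL
        have htakeL : m.take (j + r.length) = m.take j ++ r := by
          rw [List.take_add, hm]
        refine ⟨?_, ?_⟩
        · rw [hscan, hpieces]
          simp [ihl]
        · intro k hk1 hk2
          rw [hscan] at hk2
          simp only [List.length_cons] at hk2
          rcases Nat.lt_or_ge k 2 with hk | hk
          · -- k = 1
            have hke : k = 1 := by omega
            subst hke
            rw [hscan, hpieces]
            simp only [List.take_succ_cons, List.take_zero, List.drop_succ_cons, List.drop_zero,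
              List.getD_cons_zero]
            refine ⟨?_, ?_⟩
            · rw [PySem.Chars.join_singleton]
              simp
            · apply pv_join_pieces r hr (m.length)
              simp
          · -- k ≥ 2
            obtain ⟨k', rfl⟩ : ∃ k', k = k' + 1 := ⟨k - 1, by omega⟩
            have hk'1 : 1 ≤ k' := by omega
            have hk'2 : k' ≤ (pvScan m r (j + r.length) (j + r.length)).length := by omega
            obtain ⟨ihA, ihB⟩ := ihk k' hk'1 hk'2
            rw [hscan, hpieces]
            simp only [List.take_succ_cons, List.drop_succ_cons]
            have hgd : (j :: pvScan m r (j + r.length) (j + r.length)).getD (k' + 1 - 1) 0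
                = (pvScan m r (j + r.length) (j + r.length)).getD (k' - 1) 0 := by
              have : k' + 1 - 1 = (k' - 1) + 1 := by omega
              rw [this, List.getD_cons_succ]
            rw [hgd]
            refine ⟨?_, ihB⟩
            obtain ⟨t, ts, ht⟩ : ∃ t ts, (pvPieces r (m.drop (j + r.length))).take k' = t :: ts := by
              have hne : (pvPieces r (m.drop (j + r.length))).take k' ≠ [] := by
                have h1 := pvPieces_ne_nil r (m.drop (j + r.length))
                cases hqq : pvPieces r (m.drop (j + r.length)) with
                | nil => exact absurd hqq h1
                | cons a t =>
                  cases k' with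
                  | zero => omega
                  | succ k'' => simp
              cases hqq : (pvPieces r (m.drop (j + r.length))).take k' with
              | nil => exact absurd hqq hne
              | cons a t => exact ⟨a, t, rfl⟩
            rw [ht]
            rw [PySem.Chars.join_cons_cons, List.nil_append]
            rw [← ht]
            rw [← List.append_assoc, ← htakeL]
            exact ihA
      · -- no match at j
        have hscan : pvScan m r j j = pvScan m r (j+1) (j+1) := by
          conv_lhs => rw [pvScan]
          rw [dif_pos hjl, if_neg (fun h => hm h.2)]
          exact pv_scan_gate m r (m.length - (j+1)) (j+1) j (j+1) le_rfl (by omega) le_rfl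
        have hdropc : m.drop j = m[j] :: m.drop (j+1) := List.drop_eq_getElem_cons hjl
        obtain ⟨q, qs, hq⟩ : ∃ q qs, pvPieces r (m.drop (j+1)) = q :: qs := by
          cases hqq : pvPieces r (m.drop (j+1)) with
          | nil => exact absurd hqq (pvPieces_ne_nil r _)
          | cons a t => exact ⟨a, t, rfl⟩
        have hpieces : pvPieces r (m.drop j) = (m[j] :: q) :: qs := by
          rw [hdropc]
          apply pvPieces_cons_eq r m[j] (m.drop (j+1)) q qs _ hq
          intro h
          rw [← hdropc] at h
          exact hm ((pv_match_iff m r j).mpr h.2)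
        obtain ⟨ihl, ihk⟩ := ih (j+1) (by omega) (by omega)
        rw [hq] at ihl
        have htake1 : m.take (j+1) = m.take j ++ [m[j]] := by
          rw [List.take_succ, List.getElem?_eq_getElem hjl]
          rfl
        refine ⟨?_, ?_⟩
        · rw [hscan, hpieces]
          simpa using ihl
        · intro k hk1 hk2
          rw [hscan] at hk2 ⊢
          obtain ⟨ihA, ihB⟩ := ihk k hk1 hk2
          rw [hq] at ihA ihB
          rw [hpieces]
          obtain ⟨k', rfl⟩ : ∃ k', k = k' + 1 := ⟨k - 1, by omega⟩
          simp only [List.take_succ_cons, List.drop_succ_cons] at ihA ihB ⊢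
          refine ⟨?_, ihB⟩
          have hjoin : PySem.Chars.join r ((m[j] :: q) :: qs.take k')
              = m[j] :: PySem.Chars.join r (q :: qs.take k') := by
            have : (m[j] :: q) = [m[j]] ++ q := rfl
            rw [this, pv_join_cons_head]
            rfl
          rw [hjoin]
          rw [htake1, List.append_assoc, List.singleton_append] at ihA
          exact ihA
    · -- j = m.length
      have hje : j = m.length := by omega
      subst hje
      rw [List.drop_length, pvPieces_nil r hr, pvScan, dif_neg (lt_irrefl _)]
      exact ⟨rfl, fun k hk1 hk2 => absurd hk2 (by simp; omega)⟩

-- per-rule bridge ----------------------------------------------------------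
theorem pv_rule_bridge (m r rep x : List Char) (hr : r ≠ []) :
    (∃ i ∈ pvOcc m r (m.length + 2) 0, x = pvBuild m r rep i) ↔
    (∃ k : Nat, 1 ≤ k ∧ k < (PySem.Chars.splitOn m r).length ∧
      x = PySem.Chars.join r ((PySem.Chars.splitOn m r).take k) ++ rep ++
          PySem.Chars.join r ((PySem.Chars.splitOn m r).drop k)) := by
  have hocc : pvScan m r 0 0 = pvOcc m r (m.length + 2) 0 := by
    have h := pv_scan_eq_occ m r hr m.length 0 0 (m.length + 2) (by omega) (by omega) (by omega)
      (by simp)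
    simpa using h
  rw [pv_splitOn_eq m r hr]
  obtain ⟨hlen, hks⟩ := pv_corr m r hr m.length 0 (by omega) (by omega)
  simp only [List.drop_zero, List.take_zero, List.nil_append] at hlen hks
  rw [← hocc]
  constructor
  · rintro ⟨i, hi, rfl⟩
    obtain ⟨k0, hk0, hk0e⟩ := List.mem_iff_getElem.mp hi
    refine ⟨k0 + 1, by omega, by omega, ?_⟩
    obtain ⟨hA, hB⟩ := hks (k0 + 1) (by omega) (by omega)
    have hgd : (pvScan m r 0 0).getD (k0 + 1 - 1) 0 = i := by
      have h1 : k0 + 1 - 1 = k0 := by omega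
      rw [h1, List.getD_eq_getElem _ _ hk0, hk0e]
    rw [hgd] at hA hB
    rw [hA, hB]
    rfl
  · rintro ⟨k, hk1, hk2, rfl⟩
    have hk2' : k ≤ (pvScan m r 0 0).length := by omega
    obtain ⟨hA, hB⟩ := hks k hk1 hk2'
    refine ⟨(pvScan m r 0 0).getD (k-1) 0, ?_, ?_⟩
    · have hlt : k - 1 < (pvScan m r 0 0).length := by omega
      rw [List.getD_eq_getElem _ _ hlt]
      exact List.getElem_mem hlt
    · rw [hA, hB]
      rfl

-- B-side membership --------------------------------------------------------
theorem pv_mem_double (ks : List Int) (reps : List (List Char)) (f : Int → List Char → List Char)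
    (seen : PySem.Set (List Char)) (x : List Char) :
    x ∈ ks.foldl (fun s k => reps.foldl (fun a rep => PySem.Set.add a (f k rep)) s) seen ↔
      x ∈ seen ∨ ∃ k ∈ ks, ∃ rep ∈ reps, x = f k rep := by
  induction ks generalizing seen with
  | nil => simp
  | cons k ks ih =>
    simp only [List.foldl_cons]
    rw [ih, PySem.Set.mem_foldl_add]
    constructor
    · rintro ((h | ⟨rep, hrep, rfl⟩) | ⟨k', hk', rep, hrep, rfl⟩)
      · exact Or.inl h
      · exact Or.inr ⟨k, by simp, rep, hrep, rfl⟩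
      · exact Or.inr ⟨k', List.mem_cons_of_mem _ hk', rep, hrep, rfl⟩
    · rintro (h | ⟨k', hk', rep, hrep, rfl⟩)
      · exact Or.inl (Or.inl h)
      · rcases List.mem_cons.mp hk' with rfl | hk'
        · exact Or.inl (Or.inr ⟨rep, hrep, rfl⟩)
        · exact Or.inr ⟨k', hk', rep, hrep, rfl⟩

theorem pv_nodup_double (ks : List Int) (reps : List (List Char)) (f : Int → List Char → List Char)
    (seen : PySem.Set (List Char)) (h : seen.Nodup) :
    (ks.foldl (fun s k => reps.foldl (fun a rep => PySem.Set.add a (f k rep)) s) seen).Nodup := by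
  induction ks generalizing seen with
  | nil => exact h
  | cons k ks ih => exact ih _ (pv_nodup_foldl_add _ _ _ h)

theorem pv_memB (m : List Char) :
    ∀ (rules : List (String × List String)) (acc : PySem.Set (List Char)) (x : List Char),
    x ∈ rules.foldl
        (fun seen pr =>
          (PySem.List.pyRange 1 ((PySem.Chars.splitOn m pr.1.toList).length : Int)).foldl
            (fun seen k =>
              (pr.2.map String.toList).foldl
                (fun a rep => PySem.Set.add a
                  (PySem.Chars.join pr.1.toList (PySem.List.slice (PySem.Chars.splitOn m pr.1.toList) none (some k)) ++ rep ++
                   PySem.Chars.join pr.1.toList (PySem.List.slice (PySem.Chars.splitOn m pr.1.toList) (some k) none))) seen)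
            seen) acc ↔
      x ∈ acc ∨ ∃ pr ∈ rules, ∃ k ∈ PySem.List.pyRange 1 ((PySem.Chars.splitOn m pr.1.toList).length : Int),
        ∃ rep ∈ pr.2,
          x = PySem.Chars.join pr.1.toList (PySem.List.slice (PySem.Chars.splitOn m pr.1.toList) none (some k)) ++ rep.toList ++
              PySem.Chars.join pr.1.toList (PySem.List.slice (PySem.Chars.splitOn m pr.1.toList) (some k) none) := by
  intro rules
  induction rules with
  | nil => intro acc x; simp
  | cons pr rules ih =>
    intro acc x
    simp only [List.foldl_cons]
    rw [ih, pv_mem_double]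
    constructor
    · rintro ((h | ⟨k, hk, rep, hrep, rfl⟩) | ⟨pr', hpr', k, hk, rep, hrep, rfl⟩)
      · exact Or.inl h
      · obtain ⟨rep0, hrep0, rfl⟩ := List.mem_map.mp hrep
        exact Or.inr ⟨pr, by simp, k, hk, rep0, hrep0, rfl⟩
      · exact Or.inr ⟨pr', List.mem_cons_of_mem _ hpr', k, hk, rep, hrep, rfl⟩
    · rintro (h | ⟨pr', hpr', k, hk, rep, hrep, rfl⟩)
      · exact Or.inl (Or.inl h)
      · rcases List.mem_cons.mp hpr' with rfl | hpr'
        · exact Or.inl (Or.inr ⟨k, hk, rep.toList, List.mem_map.mpr ⟨rep, hrep, rfl⟩, rfl⟩)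
        · exact Or.inr ⟨pr', hpr', k, hk, rep, hrep, rfl⟩

theorem pv_nodupB (m : List Char) :
    ∀ (rules : List (String × List String)) (acc : PySem.Set (List Char)), acc.Nodup →
    (rules.foldl
        (fun seen pr =>
          (PySem.List.pyRange 1 ((PySem.Chars.splitOn m pr.1.toList).length : Int)).foldl
            (fun seen k =>
              (pr.2.map String.toList).foldl
                (fun a rep => PySem.Set.add a
                  (PySem.Chars.join pr.1.toList (PySem.List.slice (PySem.Chars.splitOn m pr.1.toList) none (some k)) ++ rep ++
                   PySem.Chars.join pr.1.toList (PySem.List.slice (PySem.Chars.splitOn m pr.1.toList) (some k) none))) seen)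
            seen) acc).Nodup := by
  intro rules
  induction rules with
  | nil => intro acc h; simpa using h
  | cons pr rules ih =>
    intro acc h
    exact ih _ (pv_nodup_double _ _ _ _ h)

theorem pv_toList_ne (s : String) (h : s ≠ "") : s.toList ≠ [] := by
  intro h0
  apply h
  simpa using congrArg String.ofList h0

-- Int k in pyRange ↔ Nat k with take/drop ----------------------------------
theorem pv_range_slice (parts : List (List Char)) (r rep x : List Char) :
    (∃ k ∈ PySem.List.pyRange 1 (parts.length : Int),
        x = PySem.Chars.join r (PySem.List.slice parts none (some k)) ++ rep ++
            PySem.Chars.join r (PySem.List.slice parts (some k) none)) ↔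
    (∃ k : Nat, 1 ≤ k ∧ k < parts.length ∧
        x = PySem.Chars.join r (parts.take k) ++ rep ++ PySem.Chars.join r (parts.drop k)) := by
  constructor
  · rintro ⟨k, hk, rfl⟩
    obtain ⟨hk1, hk2⟩ := PySem.List.mem_pyRange_one.mp hk
    refine ⟨k.toNat, by omega, by omega, ?_⟩
    rw [PySem.List.slice_to parts (by omega), PySem.List.slice_from parts (by omega)]
  · rintro ⟨k, hk1, hk2, rfl⟩
    refine ⟨(k : Int), PySem.List.mem_pyRange_one.mpr ⟨by omega, by omega⟩, ?_⟩
    rw [PySem.List.slice_to parts (by omega), PySem.List.slice_from parts (by omega),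
      Int.toNat_natCast]

-- ===== VERDICT (by name: the statement is the Claim_ definition above) =====
theorem part_one_spec : Claim_equal_part_one := by
  intro rules molecule _hdom hpre
  show part_one rules molecule = part_one_alt rules molecule
  have hA' : part_one rules molecule
      = PySem.Set.len (rules.foldl (fun acc pr =>
          pvFindLoopA molecule.toList pr.1.toList (pr.2.map String.toList) (molecule.toList.length + 2) 0 acc)
          PySem.Set.empty) := rfl
  have hB' : part_one_alt rules molecule
      = PySem.Set.len (rules.foldl
          (fun seen pr =>
            (PySem.List.pyRange 1 ((PySem.Chars.splitOn molecule.toList pr.1.toList).length : Int)).foldl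
              (fun seen k =>
                (pr.2.map String.toList).foldl
                  (fun a rep => PySem.Set.add a
                    (PySem.Chars.join pr.1.toList (PySem.List.slice (PySem.Chars.splitOn molecule.toList pr.1.toList) none (some k)) ++ rep ++
                     PySem.Chars.join pr.1.toList (PySem.List.slice (PySem.Chars.splitOn molecule.toList pr.1.toList) (some k) none))) seen)
              seen) PySem.Set.empty) := rfl
  rw [hA', hB']
  have hAnodup := pv_nodupA molecule.toList rules PySem.Set.empty List.nodup_nil
  have hBnodup := pv_nodupB molecule.toList rules PySem.Set.empty List.nodup_nil
  have hmem : ∀ x, x ∈ (rules.foldl (fun acc pr =>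
      pvFindLoopA molecule.toList pr.1.toList (pr.2.map String.toList) (molecule.toList.length + 2) 0 acc)
      PySem.Set.empty) ↔ x ∈ (rules.foldl
          (fun seen pr =>
            (PySem.List.pyRange 1 ((PySem.Chars.splitOn molecule.toList pr.1.toList).length : Int)).foldl
              (fun seen k =>
                (pr.2.map String.toList).foldl
                  (fun a rep => PySem.Set.add a
                    (PySem.Chars.join pr.1.toList (PySem.List.slice (PySem.Chars.splitOn molecule.toList pr.1.toList) none (some k)) ++ rep ++
                     PySem.Chars.join pr.1.toList (PySem.List.slice (PySem.Chars.splitOn molecule.toList pr.1.toList) (some k) none))) seen)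
              seen) PySem.Set.empty) := by
    intro x
    rw [pv_memA molecule.toList rules PySem.Set.empty x, pv_memB molecule.toList rules PySem.Set.empty x]
    have hempty : ¬ x ∈ (PySem.Set.empty : PySem.Set (List Char)) := List.not_mem_nil
    constructor
    · rintro (h | ⟨pr, hpr, i, hi, rep, hrep, rfl⟩)
      · exact absurd h hempty
      · have hrne : pr.1.toList ≠ [] := pv_toList_ne pr.1 (hpre pr hpr)
        obtain ⟨k, hk1, hk2, hx⟩ := (pv_rule_bridge molecule.toList pr.1.toList rep.toList _ hrne).mp
          ⟨i, hi, rfl⟩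
        obtain ⟨k', hk', hx'⟩ := (pv_range_slice (PySem.Chars.splitOn molecule.toList pr.1.toList)
          pr.1.toList rep.toList _).mpr ⟨k, hk1, hk2, hx⟩
        exact Or.inr ⟨pr, hpr, k', hk', rep, hrep, hx'⟩
    · rintro (h | ⟨pr, hpr, k, hk, rep, hrep, rfl⟩)
      · exact absurd h hempty
      · have hrne : pr.1.toList ≠ [] := pv_toList_ne pr.1 (hpre pr hpr)
        obtain ⟨kn, hk1, hk2, hx⟩ := (pv_range_slice (PySem.Chars.splitOn molecule.toList pr.1.toList)
          pr.1.toList rep.toList _).mp ⟨k, hk, rfl⟩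
        obtain ⟨i, hi, hx'⟩ := (pv_rule_bridge molecule.toList pr.1.toList rep.toList _ hrne).mpr
          ⟨kn, hk1, hk2, hx⟩
        rw [hx']
        exact Or.inr ⟨pr, hpr, i, hi, rep, hrep, rfl⟩
  have hperm := (List.perm_ext_iff_of_nodup hAnodup hBnodup).mpr hmem
  simp only [PySem.Set.len]
  rw [hperm.length_eq]
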